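-- pv_equiv track=rewrite | github.com/yessinek97/yessinek97 | biondeep_ig/ablation_study.py | get_features_from_combination
-- ===== SOURCE A (Python) =====
-- from copy import deepcopy
--
-- ALL_FEATURES = [
--     "wt_fasgai_alpha_turn",
--     "expression",
--     "tested_dissimilarity_richman_pep_mhci",
--     "nontested_score_biondeep_mhci",
--     "gravy_nontested_pep_moment_whole",
--     "nontested_kiderafac1_pep_mhci",
--     "eisenberg_tested_pep_moment_whole",
--     "eisenberg_tested_pep_moment_mhci",
--     "tested_fasgai_alpha_turn_pep_mhci",
--     "argos_nontested_pep_moment_whole",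
--     "nontested_charge_stryer_pep_mhci",
--     "mswhim1_tc3_mhci",
--     "nontested_kiderafac10_pep_mhci",
--     "presentation_score",
--     "tested_kiderafac1_pep_mhci",
--     "tested_pk_pep_mhci",
--     "kytedoolittle_nontested_pep_moment_whole",
--     "tested_score_biondeep_mhci",
--     "gravy_nontested_pep_moment_mhci",
--     "mcla720101",
--     "tm_tend_tested_pep_global_whole",
--     "nontested_foreignness_richman_pep_mhci",
-- ]
--
-- BNT_FEATURES = [
--     "wt_fasgai_alpha_turn",
--     "tested_dissimilarity_richman_pep_mhci",
--     "gravy_nontested_pep_moment_whole",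
--     "nontested_kiderafac1_pep_mhci",
--     "eisenberg_tested_pep_moment_whole",
--     "eisenberg_tested_pep_moment_mhci",
--     "tested_fasgai_alpha_turn_pep_mhci",
--     "argos_nontested_pep_moment_whole",
--     "nontested_charge_stryer_pep_mhci",
--     "mswhim1_tc3_mhci",
--     "nontested_kiderafac10_pep_mhci",
--     "tested_kiderafac1_pep_mhci",
--     "tested_pk_pep_mhci",
--     "kytedoolittle_nontested_pep_moment_whole",
--     "gravy_nontested_pep_moment_mhci",
--     "mcla720101",
--     "tm_tend_tested_pep_global_whole",
--     "nontested_foreignness_richman_pep_mhci",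
-- ]
--
-- BINDING = ["nontested_score_biondeep_mhci", "tested_score_biondeep_mhci"]
--
-- EXPRESSION = ["expression"]
--
-- PRESENTATION = ["presentation_score"]
--
-- def get_features_from_combination(combination):
--     """Construct a features list from a given combination of features.
--
--     Args:
--         combination (tuple): A 4-tuple indicating which features are taken.
--
--     Returns:
--         list(str): A list of features.
--     """
--     features = deepcopy(ALL_FEATURES)
--     if combination[0] == 0:
--         for feat in BNT_FEATURES:
--             features.remove(feat)
--     if combination[1] == 0:
--         for feat in BINDING:
--             features.remove(feat)
--     if combination[2] == 0:
--         for feat in EXPRESSION: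
--             features.remove(feat)
--     if combination[3] == 0:
--         for feat in PRESENTATION:
--             features.remove(feat)
--     return features
-- ===== SOURCE B (Python) =====
-- ALL_FEATURES = [
--     "wt_fasgai_alpha_turn",
--     "expression",
--     "tested_dissimilarity_richman_pep_mhci",
--     "nontested_score_biondeep_mhci",
--     "gravy_nontested_pep_moment_whole",
--     "nontested_kiderafac1_pep_mhci",
--     "eisenberg_tested_pep_moment_whole",
--     "eisenberg_tested_pep_moment_mhci",
--     "tested_fasgai_alpha_turn_pep_mhci",
--     "argos_nontested_pep_moment_whole",
--     "nontested_charge_stryer_pep_mhci",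
--     "mswhim1_tc3_mhci",
--     "nontested_kiderafac10_pep_mhci",
--     "presentation_score",
--     "tested_kiderafac1_pep_mhci",
--     "tested_pk_pep_mhci",
--     "kytedoolittle_nontested_pep_moment_whole",
--     "tested_score_biondeep_mhci",
--     "gravy_nontested_pep_moment_mhci",
--     "mcla720101",
--     "tm_tend_tested_pep_global_whole",
--     "nontested_foreignness_richman_pep_mhci",
-- ]
--
-- BNT_FEATURES = [
--     "wt_fasgai_alpha_turn",
--     "tested_dissimilarity_richman_pep_mhci",
--     "gravy_nontested_pep_moment_whole",
--     "nontested_kiderafac1_pep_mhci",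
--     "eisenberg_tested_pep_moment_whole",
--     "eisenberg_tested_pep_moment_mhci",
--     "tested_fasgai_alpha_turn_pep_mhci",
--     "argos_nontested_pep_moment_whole",
--     "nontested_charge_stryer_pep_mhci",
--     "mswhim1_tc3_mhci",
--     "nontested_kiderafac10_pep_mhci",
--     "tested_kiderafac1_pep_mhci",
--     "tested_pk_pep_mhci",
--     "kytedoolittle_nontested_pep_moment_whole",
--     "gravy_nontested_pep_moment_mhci",
--     "mcla720101",
--     "tm_tend_tested_pep_global_whole",
--     "nontested_foreignness_richman_pep_mhci",
-- ]
--
-- BINDING = ["nontested_score_biondeep_mhci", "tested_score_biondeep_mhci"]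
--
-- EXPRESSION = ["expression"]
--
-- PRESENTATION = ["presentation_score"]
--
--
-- def get_features_from_combination(combination):
--     """Construct a features list from a given combination of features."""
--     excluded = set()
--     if combination[0] == 0:
--         excluded.update(BNT_FEATURES)
--     if combination[1] == 0:
--         excluded.update(BINDING)
--     if combination[2] == 0:
--         excluded.update(EXPRESSION)
--     if combination[3] == 0:
--         excluded.update(PRESENTATION)
--     return [f for f in ALL_FEATURES if f not in excluded]
-- ===== Notes on version B (the rewrite author's own statement) =====
-- stated objective: simpler
-- what changed: Builds one excluded set from the deselected feature groups and filters ALL_FEATURES in a single pass, instead of deepcopying ALL_FEATURES and repeatedly calling list.remove (a linear scan per removed feature).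
import Mathlib
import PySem

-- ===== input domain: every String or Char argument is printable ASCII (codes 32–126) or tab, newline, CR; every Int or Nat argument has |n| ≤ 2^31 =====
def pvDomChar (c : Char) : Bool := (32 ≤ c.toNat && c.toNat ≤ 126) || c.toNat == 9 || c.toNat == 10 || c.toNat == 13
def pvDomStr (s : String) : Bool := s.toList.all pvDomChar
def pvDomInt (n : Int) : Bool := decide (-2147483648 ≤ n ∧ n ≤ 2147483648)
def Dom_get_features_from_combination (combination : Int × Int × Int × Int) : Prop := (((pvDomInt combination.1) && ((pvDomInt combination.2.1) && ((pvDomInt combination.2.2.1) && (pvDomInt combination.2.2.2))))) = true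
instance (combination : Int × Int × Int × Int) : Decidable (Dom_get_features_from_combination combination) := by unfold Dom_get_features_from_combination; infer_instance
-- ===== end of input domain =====

-- ===== PORT A =====
-- Port of A: B builds an excluded set once and keeps ALL_FEATURES order in one filter pass (simpler than A's deepcopy + repeated list.remove).
def ALL_FEATURES : List String := [
  "wt_fasgai_alpha_turn",
  "expression",
  "tested_dissimilarity_richman_pep_mhci",
  "nontested_score_biondeep_mhci",
  "gravy_nontested_pep_moment_whole",
  "nontested_kiderafac1_pep_mhci",
  "eisenberg_tested_pep_moment_whole",
  "eisenberg_tested_pep_moment_mhci",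
  "tested_fasgai_alpha_turn_pep_mhci",
  "argos_nontested_pep_moment_whole",
  "nontested_charge_stryer_pep_mhci",
  "mswhim1_tc3_mhci",
  "nontested_kiderafac10_pep_mhci",
  "presentation_score",
  "tested_kiderafac1_pep_mhci",
  "tested_pk_pep_mhci",
  "kytedoolittle_nontested_pep_moment_whole",
  "tested_score_biondeep_mhci",
  "gravy_nontested_pep_moment_mhci",
  "mcla720101",
  "tm_tend_tested_pep_global_whole",
  "nontested_foreignness_richman_pep_mhci"]

def BNT_FEATURES : List String := [
  "wt_fasgai_alpha_turn",
  "tested_dissimilarity_richman_pep_mhci",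
  "gravy_nontested_pep_moment_whole",
  "nontested_kiderafac1_pep_mhci",
  "eisenberg_tested_pep_moment_whole",
  "eisenberg_tested_pep_moment_mhci",
  "tested_fasgai_alpha_turn_pep_mhci",
  "argos_nontested_pep_moment_whole",
  "nontested_charge_stryer_pep_mhci",
  "mswhim1_tc3_mhci",
  "nontested_kiderafac10_pep_mhci",
  "tested_kiderafac1_pep_mhci",
  "tested_pk_pep_mhci",
  "kytedoolittle_nontested_pep_moment_whole",
  "gravy_nontested_pep_moment_mhci",
  "mcla720101",
  "tm_tend_tested_pep_global_whole",
  "nontested_foreignness_richman_pep_mhci"]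

def BINDING : List String := [
  "nontested_score_biondeep_mhci",
  "tested_score_biondeep_mhci"]

def EXPRESSION : List String := [
  "expression"]

def PRESENTATION : List String := [
  "presentation_score"]


-- for feat in group: features.remove(feat) — PySem.List.remove? is Python's list.remove;
-- it is none only when feat is absent, which never happens here (each group ⊆ ALL_FEATURES,
-- no duplicates), so .getD acc only totalises, it is never taken.
def removeEach (fs : List String) (group : List String) : List String :=
  group.foldl (fun acc feat => (PySem.List.remove? acc feat).getD acc) fs

def get_features_from_combination (combination : Int × Int × Int × Int) : List String :=
  let features := ALL_FEATURES
  let features := if combination.1 = 0 then removeEach features BNT_FEATURES else features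
  let features := if combination.2.1 = 0 then removeEach features BINDING else features
  let features := if combination.2.2.1 = 0 then removeEach features EXPRESSION else features
  let features := if combination.2.2.2 = 0 then removeEach features PRESENTATION else features
  features

-- ===== PORT B =====
def get_features_from_combination_alt (combination : Int × Int × Int × Int) : List String :=
  let excluded : PySem.Set String := PySem.Set.empty
  let excluded := if combination.1 = 0 then PySem.Set.update excluded BNT_FEATURES else excluded
  let excluded := if combination.2.1 = 0 then PySem.Set.update excluded BINDING else excluded
  let excluded := if combination.2.2.1 = 0 then PySem.Set.update excluded EXPRESSION else excluded
  let excluded := if combination.2.2.2 = 0 then PySem.Set.update excluded PRESENTATION else excluded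
  ALL_FEATURES.filter (fun f => !(PySem.Set.contains excluded f))

-- ===== PRECONDITION & SPEC =====
def Spec_get_features_from_combination (combination : Int × Int × Int × Int) (out : List String) : Prop := out = get_features_from_combination_alt combination
instance (combination : Int × Int × Int × Int) (out : List String) : Decidable (Spec_get_features_from_combination combination out) := by unfold Spec_get_features_from_combination; infer_instance

-- ===== CLAIM (what is proved, stated in full; the proofs are below) =====
def Claim_equal_get_features_from_combination : Prop := ∀ (combination : Int × Int × Int × Int), Dom_get_features_from_combination combination → Spec_get_features_from_combination combination (get_features_from_combination combination)

-- ===== LEMMAS AND PROOFS =====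

-- ===== VERDICT (by name: the statement is the Claim_ definition above) =====
theorem get_features_from_combination_spec : Claim_equal_get_features_from_combination := by
  intro c _
  unfold Spec_get_features_from_combination
  obtain ⟨a, b, e, d⟩ := c
  simp only [get_features_from_combination, get_features_from_combination_alt]
  split_ifs <;> decide
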